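-- pv_equiv track=rewrite | github.com/hassanmzia/Inhealth-Capstone-Project | agents/tier1_monitoring/temperature_agent.py | _build_clinical_flags
-- ===== SOURCE A (Python) =====
-- from typing import Any, Dict, List, Optional
--
-- def _build_clinical_flags(
--
--     conditions: List[Dict[str, Any]],
--     medications: List[Dict[str, Any]],
--     allergies: List[Dict[str, Any]],
-- ) -> Dict[str, Any]:
--     """Build patient-specific clinical flags for safe recommendation generation."""
--     condition_texts = [
--         (c.get("display", "") + " " + c.get("code", "")).lower() for c in conditions
--     ]
--     med_texts = [
--         (m.get("display", "") + " " + m.get("medication_display", "")).lower() for m in medications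
--     ]
--     allergy_texts = [
--         (a.get("display", "") + " " + a.get("code", "")).lower() for a in allergies
--     ]
--
--     # Condition flags
--     has_ckd = any(k in t for t in condition_texts for k in ["chronic kidney", "ckd", "renal failure", "n18"])
--     has_liver_disease = any(k in t for t in condition_texts for k in ["cirrhosis", "hepatic", "liver disease", "k74", "k70"])
--     has_heart_failure = any(k in t for t in condition_texts for k in ["heart failure", "chf", "i50", "cardiomyopathy"])
--     has_copd = any(k in t for t in condition_texts for k in ["copd", "j44", "chronic obstructive"])
--     has_asthma = any(k in t for t in condition_texts for k in ["asthma", "j45"])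
--     has_diabetes = any(k in t for t in condition_texts for k in ["diabetes", "e11", "e10"])
--     is_immunocompromised = any(
--         k in t for t in condition_texts
--         for k in ["hiv", "immunodeficiency", "transplant", "leukemia", "lymphoma", "chemotherapy", "d84"]
--     )
--
--     # Medication flags
--     anticoag_keywords = ["warfarin", "heparin", "enoxaparin", "rivaroxaban", "apixaban", "dabigatran", "edoxaban"]
--     nsaid_keywords = ["ibuprofen", "naproxen", "diclofenac", "celecoxib", "meloxicam", "indomethacin", "ketorolac", "aspirin"]
--     on_anticoagulants = any(k in t for t in med_texts for k in anticoag_keywords)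
--     on_nsaids = any(k in t for t in med_texts for k in nsaid_keywords)
--     on_immunosuppressants = any(
--         k in t for t in med_texts
--         for k in ["methotrexate", "cyclosporine", "tacrolimus", "mycophenolate", "azathioprine", "prednisone", "dexamethasone"]
--     )
--     on_ace_inhibitors = any(k in t for t in med_texts for k in ["lisinopril", "enalapril", "ramipril", "captopril", "benazepril"])
--
--     # Allergy flags
--     nsaid_allergy = any(k in t for t in allergy_texts for k in nsaid_keywords + ["nsaid"])
--     acetaminophen_allergy = any(k in t for t in allergy_texts for k in ["acetaminophen", "paracetamol", "tylenol"])
--     penicillin_allergy = any(k in t for t in allergy_texts for k in ["penicillin", "amoxicillin", "ampicillin"])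
--     sulfa_allergy = any(k in t for t in allergy_texts for k in ["sulfa", "sulfamethoxazole", "trimethoprim"])
--     aspirin_allergy = any("aspirin" in t for t in allergy_texts)
--
--     return {
--         "has_ckd": has_ckd,
--         "has_liver_disease": has_liver_disease,
--         "has_heart_failure": has_heart_failure,
--         "has_copd": has_copd,
--         "has_asthma": has_asthma,
--         "has_diabetes": has_diabetes,
--         "is_immunocompromised": is_immunocompromised or on_immunosuppressants,
--         "on_anticoagulants": on_anticoagulants,
--         "on_nsaids": on_nsaids,
--         "on_ace_inhibitors": on_ace_inhibitors,
--         "nsaid_allergy": nsaid_allergy,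
--         "acetaminophen_allergy": acetaminophen_allergy,
--         "penicillin_allergy": penicillin_allergy,
--         "sulfa_allergy": sulfa_allergy,
--         "aspirin_allergy": aspirin_allergy,
--     }
-- ===== SOURCE B (Python) =====
-- from typing import Any, Dict, List
--
-- # Inverted keyword -> flag index, one per text group.
-- _CONDITION_INDEX = [
--     ("chronic kidney", "has_ckd"), ("ckd", "has_ckd"), ("renal failure", "has_ckd"), ("n18", "has_ckd"),
--     ("cirrhosis", "has_liver_disease"), ("hepatic", "has_liver_disease"), ("liver disease", "has_liver_disease"),
--     ("k74", "has_liver_disease"), ("k70", "has_liver_disease"),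
--     ("heart failure", "has_heart_failure"), ("chf", "has_heart_failure"), ("i50", "has_heart_failure"),
--     ("cardiomyopathy", "has_heart_failure"),
--     ("copd", "has_copd"), ("j44", "has_copd"), ("chronic obstructive", "has_copd"),
--     ("asthma", "has_asthma"), ("j45", "has_asthma"),
--     ("diabetes", "has_diabetes"), ("e11", "has_diabetes"), ("e10", "has_diabetes"),
--     ("hiv", "cond_immuno"), ("immunodeficiency", "cond_immuno"), ("transplant", "cond_immuno"),
--     ("leukemia", "cond_immuno"), ("lymphoma", "cond_immuno"), ("chemotherapy", "cond_immuno"), ("d84", "cond_immuno"),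
-- ]
--
-- _MEDICATION_INDEX = [
--     ("warfarin", "on_anticoagulants"), ("heparin", "on_anticoagulants"), ("enoxaparin", "on_anticoagulants"),
--     ("rivaroxaban", "on_anticoagulants"), ("apixaban", "on_anticoagulants"), ("dabigatran", "on_anticoagulants"),
--     ("edoxaban", "on_anticoagulants"),
--     ("ibuprofen", "on_nsaids"), ("naproxen", "on_nsaids"), ("diclofenac", "on_nsaids"), ("celecoxib", "on_nsaids"),
--     ("meloxicam", "on_nsaids"), ("indomethacin", "on_nsaids"), ("ketorolac", "on_nsaids"), ("aspirin", "on_nsaids"),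
--     ("methotrexate", "med_immuno"), ("cyclosporine", "med_immuno"), ("tacrolimus", "med_immuno"),
--     ("mycophenolate", "med_immuno"), ("azathioprine", "med_immuno"), ("prednisone", "med_immuno"),
--     ("dexamethasone", "med_immuno"),
--     ("lisinopril", "on_ace_inhibitors"), ("enalapril", "on_ace_inhibitors"), ("ramipril", "on_ace_inhibitors"),
--     ("captopril", "on_ace_inhibitors"), ("benazepril", "on_ace_inhibitors"),
-- ]
--
-- _ALLERGY_INDEX = [
--     ("ibuprofen", "nsaid_allergy"), ("naproxen", "nsaid_allergy"), ("diclofenac", "nsaid_allergy"),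
--     ("celecoxib", "nsaid_allergy"), ("meloxicam", "nsaid_allergy"), ("indomethacin", "nsaid_allergy"),
--     ("ketorolac", "nsaid_allergy"), ("aspirin", "nsaid_allergy"), ("nsaid", "nsaid_allergy"),
--     ("acetaminophen", "acetaminophen_allergy"), ("paracetamol", "acetaminophen_allergy"), ("tylenol", "acetaminophen_allergy"),
--     ("penicillin", "penicillin_allergy"), ("amoxicillin", "penicillin_allergy"), ("ampicillin", "penicillin_allergy"),
--     ("sulfa", "sulfa_allergy"), ("sulfamethoxazole", "sulfa_allergy"), ("trimethoprim", "sulfa_allergy"),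
--     ("aspirin", "aspirin_allergy"),
-- ]
--
--
-- def _scan(entries, key2, index, matched):
--     for e in entries:
--         t = (e.get("display", "") + " " + e.get(key2, "")).lower()
--         for kw, flag in index:
--             if kw in t:
--                 matched.add(flag)
--
--
-- def _build_clinical_flags(
--     conditions: List[Dict[str, Any]],
--     medications: List[Dict[str, Any]],
--     allergies: List[Dict[str, Any]],
-- ) -> Dict[str, Any]:
--     """Build patient-specific clinical flags for safe recommendation generation."""
--     matched = set()
--     _scan(conditions, "code", _CONDITION_INDEX, matched)
--     _scan(medications, "medication_display", _MEDICATION_INDEX, matched)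
--     _scan(allergies, "code", _ALLERGY_INDEX, matched)
--     return {
--         "has_ckd": "has_ckd" in matched,
--         "has_liver_disease": "has_liver_disease" in matched,
--         "has_heart_failure": "has_heart_failure" in matched,
--         "has_copd": "has_copd" in matched,
--         "has_asthma": "has_asthma" in matched,
--         "has_diabetes": "has_diabetes" in matched,
--         "is_immunocompromised": "cond_immuno" in matched or "med_immuno" in matched,
--         "on_anticoagulants": "on_anticoagulants" in matched,
--         "on_nsaids": "on_nsaids" in matched,
--         "on_ace_inhibitors": "on_ace_inhibitors" in matched,
--         "nsaid_allergy": "nsaid_allergy" in matched,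
--         "acetaminophen_allergy": "acetaminophen_allergy" in matched,
--         "penicillin_allergy": "penicillin_allergy" in matched,
--         "sulfa_allergy": "sulfa_allergy" in matched,
--         "aspirin_allergy": "aspirin_allergy" in matched,
--     }
-- ===== Notes on version B (the rewrite author's own statement) =====
-- stated objective: alternative
-- what changed: Replaces A's fifteen independent any()-scans over the text lists (one scan per flag, each re-walking its group's texts against its own keyword list) by a single pass per text group over an inverted keyword-to-flag index that accumulates matched flag names in one set, from which all flags (including the is_immunocompromised OR-combination) are read off at the end.
import Mathlib
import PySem

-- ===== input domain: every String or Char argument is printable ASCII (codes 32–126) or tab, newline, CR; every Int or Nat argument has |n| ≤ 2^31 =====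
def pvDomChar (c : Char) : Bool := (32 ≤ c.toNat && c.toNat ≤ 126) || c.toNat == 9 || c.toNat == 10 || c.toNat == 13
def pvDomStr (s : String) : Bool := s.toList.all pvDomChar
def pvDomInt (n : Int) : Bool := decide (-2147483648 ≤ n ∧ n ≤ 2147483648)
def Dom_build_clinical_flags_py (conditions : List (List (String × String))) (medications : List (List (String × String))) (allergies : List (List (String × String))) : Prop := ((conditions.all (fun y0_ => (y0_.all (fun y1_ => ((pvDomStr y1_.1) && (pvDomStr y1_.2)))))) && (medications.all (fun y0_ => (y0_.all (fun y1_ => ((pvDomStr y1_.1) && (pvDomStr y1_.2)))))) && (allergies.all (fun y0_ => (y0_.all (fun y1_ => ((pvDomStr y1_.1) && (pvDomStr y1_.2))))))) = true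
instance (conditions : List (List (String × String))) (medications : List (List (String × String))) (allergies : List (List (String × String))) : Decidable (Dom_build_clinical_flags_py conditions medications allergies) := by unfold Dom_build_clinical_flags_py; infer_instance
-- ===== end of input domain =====

-- B replaces A's fifteen independent keyword scans by a single pass per text group over an
-- inverted keyword→flag index accumulating matched flag names in a set (objective: alternative).


-- ===== PORT A =====
-- any(k in t for t in texts for k in kws)
def pvAnyKw (texts : List String) (kws : List String) : Bool :=
  texts.any (fun t => kws.any (fun k => PySem.Str.isIn k t))

def build_clinical_flags_py (conditions : List (List (String × String))) (medications : List (List (String × String))) (allergies : List (List (String × String))) : List (String × Bool) :=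
  let condition_texts := conditions.map (fun c => PySem.Str.lower (PySem.Dict.getD ⟨c⟩ "display" "" ++ " " ++ PySem.Dict.getD ⟨c⟩ "code" ""))
  let med_texts := medications.map (fun m => PySem.Str.lower (PySem.Dict.getD ⟨m⟩ "display" "" ++ " " ++ PySem.Dict.getD ⟨m⟩ "medication_display" ""))
  let allergy_texts := allergies.map (fun a => PySem.Str.lower (PySem.Dict.getD ⟨a⟩ "display" "" ++ " " ++ PySem.Dict.getD ⟨a⟩ "code" ""))
  let has_ckd := pvAnyKw condition_texts ["chronic kidney", "ckd", "renal failure", "n18"]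
  let has_liver_disease := pvAnyKw condition_texts ["cirrhosis", "hepatic", "liver disease", "k74", "k70"]
  let has_heart_failure := pvAnyKw condition_texts ["heart failure", "chf", "i50", "cardiomyopathy"]
  let has_copd := pvAnyKw condition_texts ["copd", "j44", "chronic obstructive"]
  let has_asthma := pvAnyKw condition_texts ["asthma", "j45"]
  let has_diabetes := pvAnyKw condition_texts ["diabetes", "e11", "e10"]
  let is_immunocompromised := pvAnyKw condition_texts ["hiv", "immunodeficiency", "transplant", "leukemia", "lymphoma", "chemotherapy", "d84"]
  let anticoag_keywords := ["warfarin", "heparin", "enoxaparin", "rivaroxaban", "apixaban", "dabigatran", "edoxaban"]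
  let nsaid_keywords := ["ibuprofen", "naproxen", "diclofenac", "celecoxib", "meloxicam", "indomethacin", "ketorolac", "aspirin"]
  let on_anticoagulants := pvAnyKw med_texts anticoag_keywords
  let on_nsaids := pvAnyKw med_texts nsaid_keywords
  let on_immunosuppressants := pvAnyKw med_texts ["methotrexate", "cyclosporine", "tacrolimus", "mycophenolate", "azathioprine", "prednisone", "dexamethasone"]
  let on_ace_inhibitors := pvAnyKw med_texts ["lisinopril", "enalapril", "ramipril", "captopril", "benazepril"]
  let nsaid_allergy := pvAnyKw allergy_texts (nsaid_keywords ++ ["nsaid"])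
  let acetaminophen_allergy := pvAnyKw allergy_texts ["acetaminophen", "paracetamol", "tylenol"]
  let penicillin_allergy := pvAnyKw allergy_texts ["penicillin", "amoxicillin", "ampicillin"]
  let sulfa_allergy := pvAnyKw allergy_texts ["sulfa", "sulfamethoxazole", "trimethoprim"]
  let aspirin_allergy := allergy_texts.any (fun t => PySem.Str.isIn "aspirin" t)
  [("has_ckd", has_ckd),
   ("has_liver_disease", has_liver_disease),
   ("has_heart_failure", has_heart_failure),
   ("has_copd", has_copd),
   ("has_asthma", has_asthma),
   ("has_diabetes", has_diabetes),
   ("is_immunocompromised", is_immunocompromised || on_immunosuppressants),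
   ("on_anticoagulants", on_anticoagulants),
   ("on_nsaids", on_nsaids),
   ("on_ace_inhibitors", on_ace_inhibitors),
   ("nsaid_allergy", nsaid_allergy),
   ("acetaminophen_allergy", acetaminophen_allergy),
   ("penicillin_allergy", penicillin_allergy),
   ("sulfa_allergy", sulfa_allergy),
   ("aspirin_allergy", aspirin_allergy)]

-- ===== PORT B =====
def pvConditionIndex : List (String × String) :=
  [("chronic kidney", "has_ckd"), ("ckd", "has_ckd"), ("renal failure", "has_ckd"), ("n18", "has_ckd"),
   ("cirrhosis", "has_liver_disease"), ("hepatic", "has_liver_disease"), ("liver disease", "has_liver_disease"),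
   ("k74", "has_liver_disease"), ("k70", "has_liver_disease"),
   ("heart failure", "has_heart_failure"), ("chf", "has_heart_failure"), ("i50", "has_heart_failure"),
   ("cardiomyopathy", "has_heart_failure"),
   ("copd", "has_copd"), ("j44", "has_copd"), ("chronic obstructive", "has_copd"),
   ("asthma", "has_asthma"), ("j45", "has_asthma"),
   ("diabetes", "has_diabetes"), ("e11", "has_diabetes"), ("e10", "has_diabetes"),
   ("hiv", "cond_immuno"), ("immunodeficiency", "cond_immuno"), ("transplant", "cond_immuno"),
   ("leukemia", "cond_immuno"), ("lymphoma", "cond_immuno"), ("chemotherapy", "cond_immuno"), ("d84", "cond_immuno")]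

def pvMedicationIndex : List (String × String) :=
  [("warfarin", "on_anticoagulants"), ("heparin", "on_anticoagulants"), ("enoxaparin", "on_anticoagulants"),
   ("rivaroxaban", "on_anticoagulants"), ("apixaban", "on_anticoagulants"), ("dabigatran", "on_anticoagulants"),
   ("edoxaban", "on_anticoagulants"),
   ("ibuprofen", "on_nsaids"), ("naproxen", "on_nsaids"), ("diclofenac", "on_nsaids"), ("celecoxib", "on_nsaids"),
   ("meloxicam", "on_nsaids"), ("indomethacin", "on_nsaids"), ("ketorolac", "on_nsaids"), ("aspirin", "on_nsaids"),
   ("methotrexate", "med_immuno"), ("cyclosporine", "med_immuno"), ("tacrolimus", "med_immuno"),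
   ("mycophenolate", "med_immuno"), ("azathioprine", "med_immuno"), ("prednisone", "med_immuno"),
   ("dexamethasone", "med_immuno"),
   ("lisinopril", "on_ace_inhibitors"), ("enalapril", "on_ace_inhibitors"), ("ramipril", "on_ace_inhibitors"),
   ("captopril", "on_ace_inhibitors"), ("benazepril", "on_ace_inhibitors")]

def pvAllergyIndex : List (String × String) :=
  [("ibuprofen", "nsaid_allergy"), ("naproxen", "nsaid_allergy"), ("diclofenac", "nsaid_allergy"),
   ("celecoxib", "nsaid_allergy"), ("meloxicam", "nsaid_allergy"), ("indomethacin", "nsaid_allergy"),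
   ("ketorolac", "nsaid_allergy"), ("aspirin", "nsaid_allergy"), ("nsaid", "nsaid_allergy"),
   ("acetaminophen", "acetaminophen_allergy"), ("paracetamol", "acetaminophen_allergy"), ("tylenol", "acetaminophen_allergy"),
   ("penicillin", "penicillin_allergy"), ("amoxicillin", "penicillin_allergy"), ("ampicillin", "penicillin_allergy"),
   ("sulfa", "sulfa_allergy"), ("sulfamethoxazole", "sulfa_allergy"), ("trimethoprim", "sulfa_allergy"),
   ("aspirin", "aspirin_allergy")]

-- _scan(entries, key2, index, matched)
def pvScan (entries : List (List (String × String))) (key2 : String) (index : List (String × String)) (matched : PySem.Set String) : PySem.Set String :=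
  entries.foldl
    (fun m e =>
      let t := PySem.Str.lower (PySem.Dict.getD ⟨e⟩ "display" "" ++ " " ++ PySem.Dict.getD ⟨e⟩ key2 "")
      index.foldl (fun m p => if PySem.Str.isIn p.1 t then PySem.Set.add m p.2 else m) m)
    matched

def build_clinical_flags_py_alt (conditions : List (List (String × String))) (medications : List (List (String × String))) (allergies : List (List (String × String))) : List (String × Bool) :=
  let m1 := pvScan conditions "code" pvConditionIndex PySem.Set.empty
  let m2 := pvScan medications "medication_display" pvMedicationIndex m1
  let matched := pvScan allergies "code" pvAllergyIndex m2
  [("has_ckd", PySem.Set.contains matched "has_ckd"),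
   ("has_liver_disease", PySem.Set.contains matched "has_liver_disease"),
   ("has_heart_failure", PySem.Set.contains matched "has_heart_failure"),
   ("has_copd", PySem.Set.contains matched "has_copd"),
   ("has_asthma", PySem.Set.contains matched "has_asthma"),
   ("has_diabetes", PySem.Set.contains matched "has_diabetes"),
   ("is_immunocompromised", PySem.Set.contains matched "cond_immuno" || PySem.Set.contains matched "med_immuno"),
   ("on_anticoagulants", PySem.Set.contains matched "on_anticoagulants"),
   ("on_nsaids", PySem.Set.contains matched "on_nsaids"),
   ("on_ace_inhibitors", PySem.Set.contains matched "on_ace_inhibitors"),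
   ("nsaid_allergy", PySem.Set.contains matched "nsaid_allergy"),
   ("acetaminophen_allergy", PySem.Set.contains matched "acetaminophen_allergy"),
   ("penicillin_allergy", PySem.Set.contains matched "penicillin_allergy"),
   ("sulfa_allergy", PySem.Set.contains matched "sulfa_allergy"),
   ("aspirin_allergy", PySem.Set.contains matched "aspirin_allergy")]

-- ===== PRECONDITION & SPEC =====
def Spec_build_clinical_flags_py (conditions : List (List (String × String))) (medications : List (List (String × String))) (allergies : List (List (String × String))) (out : List (String × Bool)) : Prop := out = build_clinical_flags_py_alt conditions medications allergies
instance (conditions : List (List (String × String))) (medications : List (List (String × String))) (allergies : List (List (String × String))) (out : List (String × Bool)) : Decidable (Spec_build_clinical_flags_py conditions medications allergies out) := by unfold Spec_build_clinical_flags_py; infer_instance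

-- ===== CLAIM (what is proved, stated in full; the proofs are below) =====
def Claim_equal_build_clinical_flags_py : Prop := ∀ (conditions : List (List (String × String))) (medications : List (List (String × String))) (allergies : List (List (String × String))), Dom_build_clinical_flags_py conditions medications allergies → Spec_build_clinical_flags_py conditions medications allergies (build_clinical_flags_py conditions medications allergies)

-- ===== LEMMAS AND PROOFS =====

theorem pv_any_false (xs : List (List (String × String))) : (xs.any fun _ => false) = false := by
  simp

theorem pv_contains_empty (x : String) : (PySem.Set.empty : PySem.Set String).contains x = false := rfl

theorem pv_contains_add (s : PySem.Set String) (y x : String) :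
    (PySem.Set.add s y).contains x = (PySem.Set.contains s x || x == y) := by
  by_cases hxy : x = y
  · subst hxy
    simp
  · have hb : (x == y) = false := beq_eq_false_iff_ne.mpr hxy
    rw [hb, Bool.or_false]
    rcases Bool.eq_false_or_eq_true (PySem.Set.contains s x) with h | h <;> rw [h]
    · exact (PySem.Set.contains_iff _ _).mpr
        ((PySem.Set.mem_add _ _ _).mpr (Or.inl ((PySem.Set.contains_iff _ _).mp h)))
    · refine Bool.eq_false_iff.mpr (fun hc => ?_)
      rcases (PySem.Set.mem_add _ _ _).mp ((PySem.Set.contains_iff _ _).mp hc) with hm | rfl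
      · rw [(PySem.Set.contains_iff _ _).mpr hm] at h; exact Bool.true_eq_false.mp h
      · exact hxy rfl

theorem pv_beq_comm (a b : String) : (a == b) = (b == a) := by
  by_cases h : a = b
  · subst h; rfl
  · rw [beq_eq_false_iff_ne.mpr h, beq_eq_false_iff_ne.mpr fun e => h e.symm]

theorem pv_contains_foldl_index (t : String) (index : List (String × String))
    (m : PySem.Set String) (x : String) :
    (index.foldl (fun m p => if PySem.Str.isIn p.1 t then PySem.Set.add m p.2 else m) m).contains x
      = (PySem.Set.contains m x || index.any (fun p => PySem.Str.isIn p.1 t && (p.2 == x))) := by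
  induction index generalizing m with
  | nil => simp
  | cons p rest ih =>
    simp only [List.foldl_cons, List.any_cons]
    rcases Bool.eq_false_or_eq_true (PySem.Str.isIn p.1 t) with hp | hp
    · simp only [hp, if_true, Bool.true_and]
      rw [ih, pv_contains_add, Bool.or_assoc, pv_beq_comm]
    · rw [if_neg (show ¬(PySem.Str.isIn p.1 t = true) by simp only [hp, Bool.false_eq_true, not_false_eq_true]), ih]
      simp only [hp, Bool.false_and, Bool.false_or]

theorem pv_contains_scan (entries : List (List (String × String))) (key2 : String)
    (index : List (String × String)) (m : PySem.Set String) (x : String) :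
    (pvScan entries key2 index m).contains x
      = (PySem.Set.contains m x ||
         entries.any (fun e =>
           index.any (fun p =>
             PySem.Str.isIn p.1 (PySem.Str.lower (PySem.Dict.getD ⟨e⟩ "display" "" ++ " " ++ PySem.Dict.getD ⟨e⟩ key2 "")) && (p.2 == x)))) := by
  induction entries generalizing m with
  | nil => simp [pvScan]
  | cons e rest ih =>
    simp only [pvScan, List.foldl_cons, List.any_cons] at *
    rw [ih, pv_contains_foldl_index, Bool.or_assoc]

-- ===== VERDICT (by name: the statement is the Claim_ definition above) =====
theorem build_clinical_flags_py_spec : Claim_equal_build_clinical_flags_py := by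
  intro conditions medications allergies _
  unfold Spec_build_clinical_flags_py build_clinical_flags_py build_clinical_flags_py_alt
  simp only [pv_contains_scan, pv_contains_empty, pvConditionIndex, pvMedicationIndex,
    pvAllergyIndex, pvAnyKw, List.any_cons, List.any_nil, List.any_map, Function.comp_def]
  simp [pv_any_false]
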